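-- pv_equiv track=rewrite | github.com/jjiwoning/Code_Test | baekjoon/2875.py | solution
-- ===== SOURCE A (Python) =====
-- def solution(n, m, k):
--     answer = 0
--
--     while True:
--         if n >= 2 and m >= 1 :
--             n -= 2
--             m -= 1
--             answer += 1
--         else:
--             if n + m >= k:
--                 return answer
--             else:
--                 while n + m < k:
--                     answer -= 1
--                     n += 2
--                     m += 1
--                 return answer
-- ===== SOURCE B (Python) =====
-- def solution(n, m, k):
--     # Closed form: number of teams formed greedily, then refund ceil((k-rest)/3) teams if too few spares.
--     t = min(n // 2, m)
--     if t < 0: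
--         t = 0
--     r = n + m - 3 * t
--     if r >= k:
--         return t
--     return t - (-((r - k) // 3))
-- ===== Notes on version B (the rewrite author's own statement) =====
-- stated objective: faster
-- what changed: Replaced A's two step-by-step while loops (form teams one at a time, then un-form one at a time) with an O(1) closed form: greedy team count min(n//2, m) clamped at 0, then a single ceiling-division refund when fewer than k people remain.
import Mathlib
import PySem

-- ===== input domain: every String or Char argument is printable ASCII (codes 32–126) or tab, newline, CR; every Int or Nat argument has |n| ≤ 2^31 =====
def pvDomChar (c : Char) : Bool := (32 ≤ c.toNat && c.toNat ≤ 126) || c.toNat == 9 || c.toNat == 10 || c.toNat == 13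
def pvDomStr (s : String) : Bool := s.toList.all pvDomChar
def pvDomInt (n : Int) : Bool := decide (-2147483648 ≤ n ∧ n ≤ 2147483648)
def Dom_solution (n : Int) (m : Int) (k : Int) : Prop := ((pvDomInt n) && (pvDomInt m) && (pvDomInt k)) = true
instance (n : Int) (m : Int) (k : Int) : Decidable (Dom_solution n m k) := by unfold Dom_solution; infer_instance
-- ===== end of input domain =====

-- B replaces A's two step-by-step while loops with an O(1) closed form (greedy team count + ceiling-division refund).

-- ===== PORT A =====
-- Python A's inner `while n + m < k` loop: un-form teams until at least k people remain.
def solutionInner (k : Int) (n : Int) (m : Int) (answer : Int) : Int :=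
  if n + m < k then solutionInner k (n + 2) (m + 1) (answer - 1) else answer
termination_by (k - (n + m)).toNat
decreasing_by omega

-- Python A's outer `while True` loop: form a team while possible, then return via the inner loop.
def solutionLoop (k : Int) (n : Int) (m : Int) (answer : Int) : Int :=
  if n ≥ 2 ∧ m ≥ 1 then solutionLoop k (n - 2) (m - 1) (answer + 1)
  else if n + m ≥ k then answer
  else solutionInner k n m answer
termination_by m.toNat
decreasing_by omega

def solution (n : Int) (m : Int) (k : Int) : Int := solutionLoop k n m 0

-- ===== PORT B =====
def solution_alt (n : Int) (m : Int) (k : Int) : Int :=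
  let t0 := min (PySem.Int.floordiv n 2) m
  let t := if t0 < 0 then 0 else t0
  let r := n + m - 3 * t
  if r ≥ k then t else t - (-(PySem.Int.floordiv (r - k) 3))

-- ===== PRECONDITION & SPEC =====
def Spec_solution (n : Int) (m : Int) (k : Int) (out : Int) : Prop := out = solution_alt n m k
instance (n : Int) (m : Int) (k : Int) (out : Int) : Decidable (Spec_solution n m k out) := by unfold Spec_solution; infer_instance

-- ===== CLAIM (what is proved, stated in full; the proofs are below) =====
def Claim_equal_solution : Prop := ∀ (n : Int) (m : Int) (k : Int), Dom_solution n m k → Spec_solution n m k (solution n m k)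

-- ===== LEMMAS AND PROOFS =====

theorem inner_eq (k : Int) : ∀ n m answer : Int,
    solutionInner k n m answer = answer + min 0 ((n + m - k) / 3) := by
  intro n m answer
  fun_induction solutionInner k n m answer with
  | case1 n m answer h ih => rw [ih]; omega
  | case2 n m answer h => omega

theorem loop_eq (k : Int) : ∀ n m answer : Int,
    solutionLoop k n m answer = answer + solution_alt n m k := by
  intro n m answer
  have hf2 : ∀ a : Int, PySem.Int.floordiv a 2 = a / 2 :=
    fun a => PySem.Int.floordiv_eq_ediv_of_pos (by norm_num)
  have hf3 : ∀ a : Int, PySem.Int.floordiv a 3 = a / 3 :=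
    fun a => PySem.Int.floordiv_eq_ediv_of_pos (by norm_num)
  fun_induction solutionLoop k n m answer with
  | case1 n m answer h ih =>
      rw [ih]
      simp only [solution_alt, hf2, hf3]
      split_ifs <;> omega
  | case2 n m answer h h2 =>
      simp only [solution_alt, hf2, hf3]
      split_ifs <;> omega
  | case3 n m answer h h2 =>
      rw [inner_eq]
      simp only [solution_alt, hf2, hf3]
      split_ifs <;> omega

-- ===== VERDICT (by name: the statement is the Claim_ definition above) =====
theorem solution_spec : Claim_equal_solution := by
  intro n m k _
  show solution n m k = solution_alt n m k
  rw [solution, loop_eq]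
  omega
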